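-- pv_equiv track=rewrite | github.com/petterjuan/agentic-reliability-framework | scripts/fix_type_errors.py | fix_app_py_dict_typing
-- ===== SOURCE A (Python) =====
-- def fix_app_py_dict_typing(content: str) -> str:
--     """Fix dict typing errors in app.py"""
--     # Lines 1147-1167 are causing dict-item errors
--     # The issue is that UI components are typed as Dict[str, Any] but have complex dict values
--
--     # Find and fix the problematic dict
--     ui_component_pattern = r'ui_components = \{'
--     if ui_component_pattern in content:
--         # Extract the dict section
--         lines = content.split('\n')
--         fixed_lines = []
--
--         i = 0
--         while i < len(lines):
--             line = lines[i]
--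
--             # Check if this is the problematic dict
--             if line.strip().startswith('"Markdown": {'):
--                 # This is the problematic section
--                 # Add proper type annotation
--                 fixed_lines.append('ui_components: Dict[str, Dict[str, Any]] = {')
--                 # Skip the original line
--                 i += 1
--                 continue
--
--             fixed_lines.append(line)
--             i += 1
--
--         content = '\n'.join(fixed_lines)
--
--     return content
-- ===== SOURCE B (Python) =====
-- import re
--
-- _MARKDOWN_LINE = re.compile(r'^[^\S\n]*"Markdown": \{.*$', re.MULTILINE)
--
--
-- def fix_app_py_dict_typing(content: str) -> str:
--     """Fix dict typing errors in app.py"""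
--     # Replace every line whose leading whitespace is followed by '"Markdown": {'
--     # with the properly annotated dict header, in one whole-text regex pass.
--     if 'ui_components = {' in content:
--         return _MARKDOWN_LINE.sub('ui_components: Dict[str, Dict[str, Any]] = {', content)
--     return content
-- ===== Notes on version B (the rewrite author's own statement) =====
-- stated objective: idiomatic
-- what changed: Replaces A's index-driven split/loop/append/join over lines with a single precompiled re.sub (re.MULTILINE) pass that rewrites every whole line whose leading whitespace is followed by '"Markdown": {', and drops the stray backslash from A's guard: B tests 'ui_components = {' where A tests the literal r'ui_components = \{'.
-- intended difference: On inputs containing exactly one of the substrings 'ui_components = \{' / 'ui_components = {' together with a line whose leading whitespace is followed by '"Markdown": {', exactly one of A and B rewrites those lines while the other returns the input unchanged (A fires only on the backslashed text, a regex escape mistakenly used in a plain substring test); B's value is intended because the dict header this fixer targets is the literal source text 'ui_components = {', which has no backslash. — e.g. on fix_app_py_dict_typing("ui_components = {\n \"Markdown\": {"): A returns "ui_components = {\n \"Markdown\": {", B returns "ui_components = {\nui_components: Dict[str, Dict[str, Any]] = {"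
import Mathlib
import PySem

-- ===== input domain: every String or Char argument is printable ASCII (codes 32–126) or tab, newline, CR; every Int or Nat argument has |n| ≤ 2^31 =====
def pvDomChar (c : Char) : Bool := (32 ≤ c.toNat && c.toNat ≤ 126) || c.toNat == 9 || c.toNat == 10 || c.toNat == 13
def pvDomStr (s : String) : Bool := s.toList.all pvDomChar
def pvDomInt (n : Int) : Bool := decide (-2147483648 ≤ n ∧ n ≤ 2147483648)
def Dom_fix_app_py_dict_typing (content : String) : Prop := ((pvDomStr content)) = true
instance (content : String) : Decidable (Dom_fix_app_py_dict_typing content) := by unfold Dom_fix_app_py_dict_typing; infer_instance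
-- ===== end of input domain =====

-- B replaces A's index-driven line loop by one whole-text regex pass (re.MULTILINE) and drops
-- the stray backslash from A's guard substring (see D_ below); return value only, no mutation.

-- ===== PORT A =====
-- the while-loop over `lines` with the accumulator `fixed_lines` (the running index i only
-- steps through `lines`, so it is the structural recursion on the remaining lines)
def pvFixLoop (lines : List (List Char)) (fixedLines : List (List Char)) : List (List Char) :=
  match lines with
  | [] => fixedLines.reverse
  | line :: rest =>
    if PySem.Chars.startswith (PySem.Chars.strip line) "\"Markdown\": {".toList then
      pvFixLoop rest ("ui_components: Dict[str, Dict[str, Any]] = {".toList :: fixedLines)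
    else
      pvFixLoop rest (line :: fixedLines)

def fix_app_py_dict_typing (content : String) : String :=
  -- A's guard tests for the literal text 'ui_components = \{' (the raw string r'ui_components = \{')
  if PySem.Str.isIn "ui_components = \\{" content then
    String.ofList (PySem.Chars.join ['\n']
      (pvFixLoop (PySem.Chars.splitOn content.toList ['\n']) []))
  else content

-- ===== PORT B =====
-- Hand port of the compiled-regex pass `_MARKDOWN_LINE.sub(repl, content)`: the pattern
-- r'^[^\S\n]*"Markdown": \{.*$' with re.MULTILINE matches exactly the complete lines
-- (maximal '\n'-free segments) whose leading run of non-newline whitespace ([^\S\n]*) is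
-- followed by the literal '"Markdown": {', and sub replaces each whole matched line by the
-- replacement text; so the pass is: per '\n'-separated line, replace it iff it matches.
-- Exact on the stated ASCII domain (its whitespace characters: space, tab, CR, newline).
def pvWsNotNl (c : Char) : Bool := PySem.Chars.isspace c && !(c == '\n')

def pvSubLine (line : List Char) : List Char :=
  if PySem.Chars.startswith (line.dropWhile pvWsNotNl) "\"Markdown\": {".toList then
    "ui_components: Dict[str, Dict[str, Any]] = {".toList
  else line

def fix_app_py_dict_typing_alt (content : String) : String :=
  if PySem.Str.isIn "ui_components = {" content then
    String.ofList (PySem.Chars.join ['\n']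
      ((PySem.Chars.splitOn content.toList ['\n']).map pvSubLine))
  else content

-- ===== PRECONDITION & SPEC =====
-- A's guard tests for the literal text 'ui_components = \{' — a regex escape mistakenly used in
-- a plain substring test — while B tests for the intended 'ui_components = {'; on inputs where
-- exactly one of those two substrings occurs and some line's leading whitespace is followed by
-- '"Markdown": {', exactly one of A and B rewrites those lines and the other returns the input
-- unchanged; B's value is the intended one because the dict header this fixer targets is the
-- literal source text 'ui_components = {', which contains no backslash.
def D_fix_app_py_dict_typing (content : String) : Prop :=
  PySem.Str.isIn "ui_components = \\{" content ≠ PySem.Str.isIn "ui_components = {" content ∧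
  (PySem.Chars.splitOn content.toList ['\n']).any
    (fun l => PySem.Chars.startswith (PySem.Chars.lstrip l) "\"Markdown\": {".toList) = true
instance (content : String) : Decidable (D_fix_app_py_dict_typing content) := by
  unfold D_fix_app_py_dict_typing; infer_instance

def Spec_fix_app_py_dict_typing (content : String) (out : String) : Prop :=
  ¬ D_fix_app_py_dict_typing content → out = fix_app_py_dict_typing_alt content
instance (content : String) (out : String) : Decidable (Spec_fix_app_py_dict_typing content out) := by
  unfold Spec_fix_app_py_dict_typing; infer_instance

def pvDiffWitness_fix_app_py_dict_typing : String := "ui_components = {\n \"Markdown\": {"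
def pvDiffWitnessOut_fix_app_py_dict_typing : String × String :=
  ("ui_components = {\n \"Markdown\": {",
   "ui_components = {\nui_components: Dict[str, Dict[str, Any]] = {")

-- ===== CLAIM (what is proved, stated in full; the proofs are below) =====
def Claim_unchanged_fix_app_py_dict_typing : Prop := ∀ (content : String), Dom_fix_app_py_dict_typing content → Spec_fix_app_py_dict_typing content (fix_app_py_dict_typing content)
def Claim_changed_fix_app_py_dict_typing : Prop := Dom_fix_app_py_dict_typing (pvDiffWitness_fix_app_py_dict_typing) ∧ D_fix_app_py_dict_typing (pvDiffWitness_fix_app_py_dict_typing) ∧ fix_app_py_dict_typing (pvDiffWitness_fix_app_py_dict_typing) = pvDiffWitnessOut_fix_app_py_dict_typing.1 ∧ fix_app_py_dict_typing_alt (pvDiffWitness_fix_app_py_dict_typing) = pvDiffWitnessOut_fix_app_py_dict_typing.2 ∧ pvDiffWitnessOut_fix_app_py_dict_typing.1 ≠ pvDiffWitnessOut_fix_app_py_dict_typing.2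
def Claim_exact_fix_app_py_dict_typing : Prop := ∀ (content : String), Dom_fix_app_py_dict_typing content → D_fix_app_py_dict_typing content → fix_app_py_dict_typing content ≠ fix_app_py_dict_typing_alt content

-- ===== LEMMAS AND PROOFS =====

-- A's per-line transformation, extracted from the loop body
def pvALine (line : List Char) : List Char :=
  if PySem.Chars.startswith (PySem.Chars.strip line) "\"Markdown\": {".toList then
    "ui_components: Dict[str, Dict[str, Any]] = {".toList
  else line

theorem pvFixLoop_eq_map (lines acc : List (List Char)) :
    pvFixLoop lines acc = acc.reverse ++ lines.map pvALine := by
  induction lines generalizing acc with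
  | nil => simp [pvFixLoop]
  | cons line rest ih =>
    simp only [pvFixLoop, pvALine, List.map]
    split <;> simp [ih]

-- s.rstrip() keeps any prefix that ends in a non-space character
theorem pvStartswith_rstrip (s q : List Char) (c : Char) (hc : PySem.Chars.isspace c = false) :
    PySem.Chars.startswith (PySem.Chars.rstrip s) (q ++ [c]) =
    PySem.Chars.startswith s (q ++ [c]) := by
  have hsuf : PySem.Chars.rstrip s <+: s := by
    unfold PySem.Chars.rstrip
    have h := List.dropWhile_suffix (l := s.reverse) PySem.Chars.isspace
    simpa using h.reverse
  have key : (q ++ [c]) <+: PySem.Chars.rstrip s ↔ (q ++ [c]) <+: s := by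
    constructor
    · intro h; exact h.trans hsuf
    · rintro ⟨t, ht⟩
      unfold PySem.Chars.rstrip
      rw [← ht]
      rw [show (q ++ [c] ++ t).reverse = t.reverse ++ (c :: q.reverse) by simp]
      rw [List.dropWhile_append]
      by_cases he : (List.dropWhile PySem.Chars.isspace t.reverse).isEmpty
      · rw [if_pos he]
        simp only [List.dropWhile, hc]
        exact ⟨[], by simp⟩
      · rw [if_neg he]
        exact ⟨(List.dropWhile PySem.Chars.isspace t.reverse).reverse, by simp⟩
  simp only [PySem.Chars.startswith]
  rw [Bool.eq_iff_iff]
  simpa only [List.isPrefixOf_iff_prefix] using key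

theorem pvStrip_startswith_M (l : List Char) :
    PySem.Chars.startswith (PySem.Chars.strip l) "\"Markdown\": {".toList =
    PySem.Chars.startswith (PySem.Chars.lstrip l) "\"Markdown\": {".toList := by
  have h : "\"Markdown\": {".toList = "\"Markdown\": ".toList ++ ['{'] := by decide
  rw [h, PySem.Chars.strip,
    pvStartswith_rstrip (PySem.Chars.lstrip l) _ '{' (by decide)]

theorem pvDropWhile_no_nl (l : List Char) (h : '\n' ∉ l) :
    l.dropWhile pvWsNotNl = PySem.Chars.lstrip l := by
  unfold PySem.Chars.lstrip
  induction l with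
  | nil => rfl
  | cons c rest ih =>
    simp only [List.mem_cons, not_or] at h
    have hc : ¬ (c = '\n') := fun hh => h.1 hh.symm
    simp only [List.dropWhile]
    have hw : pvWsNotNl c = PySem.Chars.isspace c := by
      simp [pvWsNotNl, hc]
    rw [hw]
    cases hs : PySem.Chars.isspace c <;> simp [ih h.2]

-- the pieces of split('\n') contain no '\n'
theorem pvGo_no_nl (fuel : Nat) (l cur : List Char) (acc : List (List Char))
    (hf : l.length < fuel) (hacc : ∀ a ∈ acc, '\n' ∉ a) (hcur : '\n' ∉ cur) :
    ∀ p ∈ PySem.Chars.splitOn.go ['\n'] fuel l cur acc, '\n' ∉ p := by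
  induction fuel generalizing l cur acc with
  | zero => omega
  | succ fuel ih =>
    cases l with
    | nil =>
      rw [PySem.Chars.splitOn.go.eq_def]
      intro p hp
      simp only [List.reverse_cons, List.mem_append, List.mem_reverse, List.mem_singleton] at hp
      rcases hp with h | h
      · exact hacc p (by simpa using h)
      · subst h; simpa using hcur
    | cons c rest =>
      rw [PySem.Chars.splitOn.go.eq_def]
      simp only []
      by_cases hpre : List.isPrefixOf ['\n'] (c :: rest) = true
      · rw [if_pos hpre]
        apply ih
        · simp at hf ⊢; omega
        · intro a ha
          simp only [List.mem_cons] at ha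
          rcases ha with h | h
          · subst h; simpa using hcur
          · exact hacc a h
        · simp
      · rw [if_neg hpre]
        apply ih
        · simp at hf ⊢; omega
        · exact hacc
        · intro hmem
          simp only [List.mem_cons] at hmem
          rcases hmem with h | h
          · apply hpre; subst h; simp [List.isPrefixOf]
          · exact hcur h

theorem pvSplit_no_nl (cs : List Char) :
    ∀ p ∈ PySem.Chars.splitOn cs ['\n'], '\n' ∉ p := by
  apply pvGo_no_nl <;> simp

theorem pvIntercalate_cons_cons (sep x y : List Char) (t : List (List Char)) :
    sep.intercalate (x :: y :: t) = x ++ sep ++ sep.intercalate (y :: t) := by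
  simp [List.intercalate, List.intersperse]

theorem pvIntercalate_single (sep z : List Char) : sep.intercalate [z] = z := by
  simp [List.intercalate, List.intersperse]

theorem pvIntercalate_merge (sep : List Char) (a : List (List Char)) (x y : List Char) :
    sep.intercalate (a ++ [x, y]) = sep.intercalate (a ++ [x ++ sep ++ y]) := by
  induction a with
  | nil => simp [pvIntercalate_cons_cons, pvIntercalate_single]
  | cons h t ih =>
    cases t with
    | nil => simp [pvIntercalate_cons_cons, pvIntercalate_single]
    | cons h2 t2 =>
      simp only [List.cons_append, pvIntercalate_cons_cons]
      rw [List.cons_append] at ih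
      simp [ih]

-- '\n'.join inverts split('\n')
theorem pvGo_join (fuel : Nat) (l cur : List Char) (acc : List (List Char)) :
    PySem.Chars.join ['\n'] (PySem.Chars.splitOn.go ['\n'] fuel l cur acc) =
    PySem.Chars.join ['\n'] (acc.reverse ++ [cur.reverse ++ l]) := by
  induction fuel generalizing l cur acc with
  | zero => rw [PySem.Chars.splitOn.go.eq_def]; simp
  | succ fuel ih =>
    cases l with
    | nil => rw [PySem.Chars.splitOn.go.eq_def]; simp
    | cons c rest =>
      rw [PySem.Chars.splitOn.go.eq_def]
      simp only []
      by_cases hpre : List.isPrefixOf ['\n'] (c :: rest) = true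
      · rw [if_pos hpre]
        rw [ih]
        have hc : c = '\n' := by
          simp [List.isPrefixOf] at hpre; exact hpre.symm
        subst hc
        simp only [PySem.Chars.join, List.length_singleton, List.drop_one, List.tail_cons,
          List.reverse_cons, List.reverse_nil, List.nil_append]
        have := pvIntercalate_merge ['\n'] acc.reverse cur.reverse rest
        simpa using this
      · rw [if_neg hpre]
        rw [ih]
        simp

theorem pvJoin_split (cs : List Char) :
    PySem.Chars.join ['\n'] (PySem.Chars.splitOn cs ['\n']) = cs := by
  rw [PySem.Chars.splitOn, pvGo_join]
  simp [PySem.Chars.join, pvIntercalate_single]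

-- on a '\n'-free line the two per-line transformations agree
theorem pvALine_eq_pvSubLine (l : List Char) (h : '\n' ∉ l) : pvALine l = pvSubLine l := by
  rw [pvALine, pvSubLine, pvStrip_startswith_M, pvDropWhile_no_nl l h]

theorem pvALine_id (l : List Char)
    (h : PySem.Chars.startswith (PySem.Chars.lstrip l) "\"Markdown\": {".toList = false) :
    pvALine l = l := by
  rw [pvALine, pvStrip_startswith_M, h]; simp

theorem pvSubLine_id (l : List Char) (hnl : '\n' ∉ l)
    (h : PySem.Chars.startswith (PySem.Chars.lstrip l) "\"Markdown\": {".toList = false) :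
    pvSubLine l = l := by
  rw [pvSubLine, pvDropWhile_no_nl l hnl, h]; simp

theorem pvMap_eq_self (f : List Char → List Char) (l : List (List Char)) (h : l.map f = l)
    (x : List Char) (hx : x ∈ l) : f x = x := by
  induction l with
  | nil => simp at hx
  | cons a t ih =>
    simp only [List.map_cons, List.cons.injEq] at h
    rcases List.mem_cons.mp hx with rfl | hx'
    · exact h.1
    · exact ih h.2 hx'

-- splitting a '\n'-free head off a joined list is unambiguous
theorem pvNlFree_head_inj (a₁ a₂ r₁ r₂ : List Char) (h₁ : '\n' ∉ a₁) (h₂ : '\n' ∉ a₂)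
    (h : a₁ ++ '\n' :: r₁ = a₂ ++ '\n' :: r₂) : a₁ = a₂ ∧ r₁ = r₂ := by
  induction a₁ generalizing a₂ with
  | nil =>
    cases a₂ with
    | nil => simpa using h
    | cons c t =>
      simp only [List.nil_append, List.cons_append, List.cons.injEq] at h
      exact absurd (h.1 ▸ List.mem_cons_self) h₂
  | cons c t ih =>
    cases a₂ with
    | nil =>
      simp only [List.cons_append, List.nil_append, List.cons.injEq] at h
      exact absurd (h.1.symm ▸ List.mem_cons_self) h₁
    | cons c₂ t₂ =>
      simp only [List.cons_append, List.cons.injEq] at h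
      obtain ⟨rfl, h'⟩ := h
      have := ih t₂ (fun hm => h₁ (List.mem_cons_of_mem _ hm)) (fun hm => h₂ (List.mem_cons_of_mem _ hm)) h'
      exact ⟨by rw [this.1], this.2⟩

-- '\n'.join is injective on equally long lists of '\n'-free pieces
theorem pvJoin_inj (l₁ l₂ : List (List Char)) (hlen : l₁.length = l₂.length)
    (h₁ : ∀ a ∈ l₁, '\n' ∉ a) (h₂ : ∀ a ∈ l₂, '\n' ∉ a)
    (h : PySem.Chars.join ['\n'] l₁ = PySem.Chars.join ['\n'] l₂) : l₁ = l₂ := by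
  induction l₁ generalizing l₂ with
  | nil => cases l₂ with
    | nil => rfl
    | cons _ _ => simp at hlen
  | cons a t ih =>
    cases l₂ with
    | nil => simp at hlen
    | cons b u =>
      cases t with
      | nil =>
        cases u with
        | nil =>
          simp only [PySem.Chars.join, pvIntercalate_single] at h
          rw [h]
        | cons _ _ => simp at hlen
      | cons t0 tt =>
        cases u with
        | nil => simp at hlen
        | cons u0 uu =>
          simp only [PySem.Chars.join, pvIntercalate_cons_cons] at h
          rw [List.append_assoc, List.append_assoc] at h
          have hsplit := pvNlFree_head_inj a b _ _
            (h₁ a List.mem_cons_self) (h₂ b List.mem_cons_self) (by simpa using h)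
          have htail : PySem.Chars.join ['\n'] (t0 :: tt) = PySem.Chars.join ['\n'] (u0 :: uu) := by
            simpa [PySem.Chars.join] using hsplit.2
          have := ih (u0 :: uu) (by simpa using hlen)
            (fun x hx => h₁ x (List.mem_cons_of_mem _ hx))
            (fun x hx => h₂ x (List.mem_cons_of_mem _ hx)) htail
          rw [hsplit.1, this]

-- a port's output on its firing branch
theorem pvA_fire (content : String)
    (hP : PySem.Str.isIn "ui_components = \\{" content = true) :
    fix_app_py_dict_typing content =
    String.ofList (PySem.Chars.join ['\n']
      ((PySem.Chars.splitOn content.toList ['\n']).map pvALine)) := by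
  rw [fix_app_py_dict_typing, if_pos hP, pvFixLoop_eq_map]
  simp

theorem pvB_fire (content : String)
    (hQ : PySem.Str.isIn "ui_components = {" content = true) :
    fix_app_py_dict_typing_alt content =
    String.ofList (PySem.Chars.join ['\n']
      ((PySem.Chars.splitOn content.toList ['\n']).map pvSubLine)) := by
  rw [fix_app_py_dict_typing_alt, if_pos hQ]

theorem pvMap_id_of_no_match (content : String)
    (hno : ∀ l ∈ PySem.Chars.splitOn content.toList ['\n'],
      PySem.Chars.startswith (PySem.Chars.lstrip l) "\"Markdown\": {".toList = false) :
    (PySem.Chars.splitOn content.toList ['\n']).map pvALine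
      = PySem.Chars.splitOn content.toList ['\n'] ∧
    (PySem.Chars.splitOn content.toList ['\n']).map pvSubLine
      = PySem.Chars.splitOn content.toList ['\n'] := by
  constructor
  · conv_rhs => rw [← List.map_id (PySem.Chars.splitOn content.toList ['\n'])]
    apply List.map_congr_left
    intro l hl
    exact pvALine_id l (hno l hl)
  · conv_rhs => rw [← List.map_id (PySem.Chars.splitOn content.toList ['\n'])]
    apply List.map_congr_left
    intro l hl
    exact pvSubLine_id l (pvSplit_no_nl content.toList l hl) (hno l hl)

-- if no line matches, the firing branch is the identity
theorem pvFire_id (content : String)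
    (hno : ∀ l ∈ PySem.Chars.splitOn content.toList ['\n'],
      PySem.Chars.startswith (PySem.Chars.lstrip l) "\"Markdown\": {".toList = false) :
    String.ofList (PySem.Chars.join ['\n']
      ((PySem.Chars.splitOn content.toList ['\n']).map pvALine)) = content ∧
    String.ofList (PySem.Chars.join ['\n']
      ((PySem.Chars.splitOn content.toList ['\n']).map pvSubLine)) = content := by
  obtain ⟨hA, hB⟩ := pvMap_id_of_no_match content hno
  rw [hA, hB, pvJoin_split, String.ofList_toList]
  exact ⟨rfl, rfl⟩

-- ===== VERDICT (by name: the statement is the Claim_ definition above) =====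
theorem fix_app_py_dict_typing_spec : Claim_unchanged_fix_app_py_dict_typing := by
  intro content _dom hD
  by_cases hP : PySem.Str.isIn "ui_components = \\{" content = true <;>
    by_cases hQ : PySem.Str.isIn "ui_components = {" content = true
  · -- both guards fire: the two per-line transformations agree on '\n'-free lines
    rw [pvA_fire content hP, pvB_fire content hQ]
    congr 1
    congr 1
    apply List.map_congr_left
    intro l hl
    exact pvALine_eq_pvSubLine l (pvSplit_no_nl content.toList l hl)
  · -- only A fires: outside D_ no line matches, so A is the identity too
    have hno : ∀ l ∈ PySem.Chars.splitOn content.toList ['\n'],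
        PySem.Chars.startswith (PySem.Chars.lstrip l) "\"Markdown\": {".toList = false := by
      by_contra hc
      push Not at hc
      obtain ⟨l, hl, hne⟩ := hc
      exact hD ⟨by rw [hP, Bool.eq_false_iff.mpr hQ]; decide,
        List.any_eq_true.mpr ⟨l, hl, by simpa using hne⟩⟩
    rw [pvA_fire content hP, (pvFire_id content hno).1,
      fix_app_py_dict_typing_alt, if_neg hQ]
  · -- only B fires: outside D_ no line matches, so B is the identity too
    have hno : ∀ l ∈ PySem.Chars.splitOn content.toList ['\n'],
        PySem.Chars.startswith (PySem.Chars.lstrip l) "\"Markdown\": {".toList = false := by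
      by_contra hc
      push Not at hc
      obtain ⟨l, hl, hne⟩ := hc
      exact hD ⟨by rw [Bool.eq_false_iff.mpr hP, hQ]; decide,
        List.any_eq_true.mpr ⟨l, hl, by simpa using hne⟩⟩
    rw [pvB_fire content hQ, (pvFire_id content hno).2,
      fix_app_py_dict_typing, if_neg hP]
  · rw [fix_app_py_dict_typing, if_neg hP, fix_app_py_dict_typing_alt, if_neg hQ]

theorem fix_app_py_dict_typing_changed : Claim_changed_fix_app_py_dict_typing := by
  unfold Claim_changed_fix_app_py_dict_typing; decide

theorem fix_app_py_dict_typing_tight : Claim_exact_fix_app_py_dict_typing := by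
  intro content _dom hD hEq
  obtain ⟨hne, hany⟩ := hD
  obtain ⟨l₀, hl₀, hm₀⟩ := List.any_eq_true.mp hany
  have hRfree : ('\n' : Char) ∉ "ui_components: Dict[str, Dict[str, Any]] = {".toList := by decide
  have hRnom : PySem.Chars.startswith
      (PySem.Chars.lstrip "ui_components: Dict[str, Dict[str, Any]] = {".toList)
      "\"Markdown\": {".toList = false := by decide
  have hl₀nl := pvSplit_no_nl content.toList l₀ hl₀
  by_cases hP : PySem.Str.isIn "ui_components = \\{" content = true <;>
    by_cases hQ : PySem.Str.isIn "ui_components = {" content = true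
  · exact hne (by rw [hP, hQ])
  · -- only A fires; hEq says its output is still `content`
    rw [pvA_fire content hP, fix_app_py_dict_typing_alt, if_neg hQ] at hEq
    have hjoin : PySem.Chars.join ['\n']
        ((PySem.Chars.splitOn content.toList ['\n']).map pvALine) =
        PySem.Chars.join ['\n'] (PySem.Chars.splitOn content.toList ['\n']) := by
      have := congrArg String.toList hEq
      rw [String.toList_ofList] at this
      rw [this, pvJoin_split]
    have hmapid := pvJoin_inj _ _ (by simp)
      (by
        intro a ha
        obtain ⟨x, hx, rfl⟩ := List.mem_map.mp ha
        by_cases hxm : PySem.Chars.startswith (PySem.Chars.strip x) "\"Markdown\": {".toList = true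
        · rw [pvALine, if_pos hxm]; exact hRfree
        · rw [pvALine, if_neg hxm]; exact pvSplit_no_nl content.toList x hx)
      (pvSplit_no_nl content.toList) hjoin
    have hid := pvMap_eq_self pvALine _ hmapid l₀ hl₀
    rw [pvALine, pvStrip_startswith_M, hm₀, if_pos rfl] at hid
    rw [← hid] at hm₀
    rw [hRnom] at hm₀
    exact Bool.false_ne_true hm₀
  · -- only B fires; hEq says its output is still `content`
    rw [pvB_fire content hQ, fix_app_py_dict_typing, if_neg hP] at hEq
    have hjoin : PySem.Chars.join ['\n']
        ((PySem.Chars.splitOn content.toList ['\n']).map pvSubLine) =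
        PySem.Chars.join ['\n'] (PySem.Chars.splitOn content.toList ['\n']) := by
      have := congrArg String.toList hEq.symm
      rw [String.toList_ofList] at this
      rw [this, pvJoin_split]
    have hmapid := pvJoin_inj _ _ (by simp)
      (by
        intro a ha
        obtain ⟨x, hx, rfl⟩ := List.mem_map.mp ha
        by_cases hxm : PySem.Chars.startswith (x.dropWhile pvWsNotNl) "\"Markdown\": {".toList = true
        · rw [pvSubLine, if_pos hxm]; exact hRfree
        · rw [pvSubLine, if_neg hxm]; exact pvSplit_no_nl content.toList x hx)
      (pvSplit_no_nl content.toList) hjoin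
    have hid := pvMap_eq_self pvSubLine _ hmapid l₀ hl₀
    rw [pvSubLine, pvDropWhile_no_nl l₀ hl₀nl, hm₀, if_pos rfl] at hid
    rw [← hid] at hm₀
    rw [hRnom] at hm₀
    exact Bool.false_ne_true hm₀
  · exact hne (by rw [Bool.eq_false_iff.mpr hP, Bool.eq_false_iff.mpr hQ])
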